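-- pv_equiv track=rewrite | github.com/uj-robotics/krakrobot2016-online | simulator/misc/vegesvgplot.py | ShapeSubpathRanges
-- ===== SOURCE A (Python) =====
-- Pt_Break = 0
--
-- def ShapeSubpathRanges(Shape):
--
--   u'''List the ranges of each subpaths in a Shape.
--
--   The shape is defined as a list of (PtType, Coords) tuples which mark
--   anchors, control points and breaks.
--
--   A subpath is defined by a contiguous run of Shape points without any
--   marked with Pt_Break. The ranges are suitable for use with the slice
--   operator.
--
--   '''
--
--   Result = []
--   SubpathStart = None
--
--   for i, ShapePt in enumerate(Shape):
--
--     PtType = ShapePt[0]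
--
--     if SubpathStart is None:
--       if PtType != Pt_Break:
--         SubpathStart = i
--     else:
--       if PtType == Pt_Break:
--         Result.append((SubpathStart, i))
--         SubpathStart = None
--
--   if SubpathStart is not None:
--     Result.append((SubpathStart, len(Shape)))
--
--   return Result
-- ===== SOURCE B (Python) =====
-- Pt_Break = 0
--
-- def ShapeSubpathRanges(Shape):
--   # Run-scanning rewrite: skip breaks, then scan each contiguous non-break run
--   # in one inner sweep, emitting its (start, end) span directly.
--   Result = []
--   n = len(Shape)
--   i = 0
--   while i < n:
--     if Shape[i][0] == Pt_Break:
--       i += 1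
--     else:
--       j = i + 1
--       while j < n and Shape[j][0] != Pt_Break:
--         j += 1
--       Result.append((i, j))
--       i = j
--   return Result
-- ===== Notes on version B (the rewrite author's own statement) =====
-- stated objective: idiomatic
-- what changed: Replaced the open/closed SubpathStart state machine over enumerate with a run-scanning pass: skip break points, then scan each contiguous non-break run in an inner sweep and emit its (start, end) span directly.
import Mathlib
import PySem

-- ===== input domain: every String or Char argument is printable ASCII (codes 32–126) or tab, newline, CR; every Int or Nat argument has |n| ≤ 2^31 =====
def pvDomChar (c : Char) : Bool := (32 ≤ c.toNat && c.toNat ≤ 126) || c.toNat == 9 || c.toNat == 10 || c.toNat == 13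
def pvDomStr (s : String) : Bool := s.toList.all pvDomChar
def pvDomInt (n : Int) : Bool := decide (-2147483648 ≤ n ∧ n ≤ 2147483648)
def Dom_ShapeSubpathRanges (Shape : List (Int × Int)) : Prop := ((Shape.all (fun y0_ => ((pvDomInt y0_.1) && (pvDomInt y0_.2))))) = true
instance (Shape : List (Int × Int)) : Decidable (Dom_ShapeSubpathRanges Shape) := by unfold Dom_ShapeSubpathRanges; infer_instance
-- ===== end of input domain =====

-- B replaces A's SubpathStart state machine with a run-scanning pass (same O(n) cost).
-- ===== PORT A =====
-- A's for-loop over enumerate(Shape) with state (Result, SubpathStart), transliterated as a recursion.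
def pvALoop : List (Int × (Int × Int)) → List (Int × Int) × Option Int → List (Int × Int) × Option Int
  | [], st => st
  | (i, pt) :: rest, (res, sps) =>
      match sps with
      | none => if pt.1 ≠ 0 then pvALoop rest (res, some i) else pvALoop rest (res, none)
      | some s => if pt.1 = 0 then pvALoop rest (res ++ [(s, i)], none) else pvALoop rest (res, some s)

def ShapeSubpathRanges (Shape : List (Int × Int)) : List (Int × Int) :=
  let st := pvALoop (PySem.List.enumerate Shape) ([], none)
  match st.2 with
  | some s => st.1 ++ [(s, (Shape.length : Int))]
  | none => st.1

-- ===== PORT B =====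
-- length of the leading non-break run (B's inner while loop)
def pvRunLen : List (Int × Int) → Nat
  | [] => 0
  | p :: rest => if p.1 ≠ 0 then pvRunLen rest + 1 else 0

-- the suffix left after the leading non-break run (where B's inner loop stops)
def pvSkipRun : List (Int × Int) → List (Int × Int)
  | [] => []
  | p :: rest => if p.1 ≠ 0 then pvSkipRun rest else p :: rest

theorem pvSkipRun_length_le : ∀ L : List (Int × Int), (pvSkipRun L).length ≤ L.length
  | [] => Nat.le_refl _
  | p :: rest => by
      simp only [pvSkipRun]
      split
      · exact Nat.le_succ_of_le (pvSkipRun_length_le rest)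
      · exact Nat.le_refl _

-- B's outer while loop: at a break advance one; at a run emit (i, j) and jump to j.
def pvBLoop : List (Int × Int) → Int → List (Int × Int)
  | [], _ => []
  | p :: rest, i =>
      if p.1 = 0 then pvBLoop rest (i + 1)
      else
        let j := i + 1 + (pvRunLen rest : Int)
        (i, j) :: pvBLoop (pvSkipRun rest) j
termination_by L => L.length
decreasing_by
  · simp
  · exact Nat.lt_succ_of_le (pvSkipRun_length_le rest)

def ShapeSubpathRanges_alt (Shape : List (Int × Int)) : List (Int × Int) :=
  pvBLoop Shape 0
-- ===== PRECONDITION & SPEC =====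
def Spec_ShapeSubpathRanges (Shape : List (Int × Int)) (out : List (Int × Int)) : Prop := out = ShapeSubpathRanges_alt Shape
instance (Shape : List (Int × Int)) (out : List (Int × Int)) : Decidable (Spec_ShapeSubpathRanges Shape out) := by unfold Spec_ShapeSubpathRanges; infer_instance

-- ===== CLAIM (what is proved, stated in full; the proofs are below) =====
def Claim_equal_ShapeSubpathRanges : Prop := ∀ (Shape : List (Int × Int)), Dom_ShapeSubpathRanges Shape → Spec_ShapeSubpathRanges Shape (ShapeSubpathRanges Shape)


-- ===== LEMMAS AND PROOFS =====

-- flush step after A's loop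
def pvClose (n : Int) : List (Int × Int) × Option Int → List (Int × Int)
  | (res, some s) => res ++ [(s, n)]
  | (res, none) => res

theorem pvRunLen_le : ∀ L : List (Int × Int), pvRunLen L ≤ L.length
  | [] => Nat.le_refl _
  | p :: rest => by
      simp only [pvRunLen]
      split
      · exact Nat.succ_le_succ (pvRunLen_le rest)
      · exact Nat.zero_le _

-- combined invariant for A's loop in both states, by strong induction on the suffix length
theorem pvMain : ∀ (n : Nat), ∀ (L : List (Int × Int)), L.length ≤ n → ∀ (i : Int) (res : List (Int × Int)),
    (pvClose (i + L.length) (pvALoop (PySem.List.enumerate L i) (res, none)) = res ++ pvBLoop L i)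
  ∧ (∀ s : Int, pvClose (i + L.length) (pvALoop (PySem.List.enumerate L i) (res, some s))
      = res ++ (s, i + (pvRunLen L : Int)) :: pvBLoop (pvSkipRun L) (i + (pvRunLen L : Int))) := by
  intro n
  induction n with
  | zero =>
    intro L hL i res
    have : L = [] := List.eq_nil_of_length_eq_zero (Nat.le_zero.mp hL)
    subst this
    simp [PySem.List.enumerate, pvALoop, pvClose, pvBLoop, pvRunLen, pvSkipRun]
  | succ n ih =>
    intro L hL i res
    cases L with
    | nil => simp [PySem.List.enumerate, pvALoop, pvClose, pvBLoop, pvRunLen, pvSkipRun]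
    | cons p rest =>
      have hr : rest.length ≤ n := by simpa using Nat.succ_le_succ_iff.mp hL
      constructor
      · -- state none
        by_cases hp : p.1 = 0
        · have := (ih rest hr (i + 1) res).1
          simp only [PySem.List.enumerate_cons, pvALoop, pvBLoop, hp]
          simp only [List.length_cons]
          have harith : i + ((rest.length : Nat) + 1 : Nat) = (i + 1) + (rest.length : Int) := by
            push_cast; ring
          rw [harith]
          simpa using this
        · have := (ih rest hr (i + 1) res).2 i
          simp only [PySem.List.enumerate_cons, pvALoop, pvBLoop, hp]
          simp only [List.length_cons, if_pos hp, if_false]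
          have harith : i + ((rest.length : Nat) + 1 : Nat) = (i + 1) + (rest.length : Int) := by
            push_cast; ring
          rw [harith]
          exact this
      · -- state some s
        intro s
        by_cases hp : p.1 = 0
        · have := (ih rest hr (i + 1) (res ++ [(s, i)])).1
          simp only [PySem.List.enumerate_cons, pvALoop, List.length_cons,
            pvRunLen, pvSkipRun, hp]
          have harith : i + ((rest.length : Nat) + 1 : Nat) = (i + 1) + (rest.length : Int) := by
            push_cast; ring
          rw [harith]
          simp only [if_true]
          rw [this]
          simp [pvBLoop, hp]
        · have := (ih rest hr (i + 1) res).2 s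
          simp only [PySem.List.enumerate_cons, pvALoop, List.length_cons,
            pvRunLen, pvSkipRun, hp]
          have harith : i + ((rest.length : Nat) + 1 : Nat) = (i + 1) + (rest.length : Int) := by
            push_cast; ring
          have harith2 : i + ((pvRunLen rest : Nat) + 1 : Nat) = (i + 1) + (pvRunLen rest : Int) := by
            push_cast; ring
          rw [harith]
          simp only [if_false, if_pos hp]
          rw [harith2, this]

-- ===== VERDICT (by name: the statement is the Claim_ definition above) =====
theorem ShapeSubpathRanges_spec : Claim_equal_ShapeSubpathRanges := by
  intro Shape _
  unfold Spec_ShapeSubpathRanges ShapeSubpathRanges ShapeSubpathRanges_alt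
  have h := (pvMain Shape.length Shape (Nat.le_refl _) 0 []).1
  simp only [List.nil_append, zero_add] at h
  rcases hst : pvALoop (PySem.List.enumerate Shape 0) ([], none) with ⟨r, sps⟩
  rw [hst] at h
  rw [← h]
  cases sps <;> simp [pvClose]
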